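-- pv_equiv track=rewrite | github.com/kubeflow-kale/kale | src/processors/notebook_to_kfp_converter.py | _clean_python_code
-- ===== SOURCE A (Python) =====
-- def _clean_python_code(code: str) -> str:
--     """Clean and format Python code"""
--     if not code:
--         return "pass"
--
--     # Remove excessive whitespace and normalize
--     lines = code.strip().split('\n')
--     cleaned_lines = []
--
--     for line in lines:
--         # Remove trailing whitespace but preserve indentation
--         cleaned_line = line.rstrip()
--         if cleaned_line or (not cleaned_lines or cleaned_lines[-1]):
--             cleaned_lines.append(cleaned_line)
--
--     return '\n'.join(cleaned_lines)
-- ===== SOURCE B (Python) =====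
-- def _clean_python_code(code: str) -> str:
--     """Clean and format Python code"""
--     if not code:
--         return "pass"
--     lines = [l.rstrip() for l in code.strip().split('\n')]
--     out = []
--     i = 0
--     n = len(lines)
--     while i < n:
--         if lines[i]:
--             out.append(lines[i])
--             i += 1
--         else:
--             out.append('')
--             while i < n and not lines[i]:
--                 i += 1
--     return '\n'.join(out)
-- ===== Notes on version B (the rewrite author's own statement) =====
-- stated objective: alternative
-- what changed: Replaced the sentinel-based pass that consults the last appended line (cleaned_lines[-1]) with a run-skipping traversal: rstrip all lines first, then walk them emitting non-blank lines and collapsing each run of blank lines to a single blank by skipping the run.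
import Mathlib
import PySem

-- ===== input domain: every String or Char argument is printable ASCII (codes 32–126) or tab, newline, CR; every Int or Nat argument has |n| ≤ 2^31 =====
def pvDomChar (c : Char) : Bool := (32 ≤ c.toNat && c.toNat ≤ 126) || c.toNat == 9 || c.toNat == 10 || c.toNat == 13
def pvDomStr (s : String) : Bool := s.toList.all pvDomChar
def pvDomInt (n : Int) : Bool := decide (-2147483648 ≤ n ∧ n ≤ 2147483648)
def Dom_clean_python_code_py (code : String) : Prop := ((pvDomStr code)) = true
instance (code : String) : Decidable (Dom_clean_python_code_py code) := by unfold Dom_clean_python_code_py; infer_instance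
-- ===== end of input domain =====

-- B collapses blank runs by skipping them instead of A's look-back at the last kept line; same result, same cost.

-- ===== PORT A =====
def clean_python_code_py (code : String) : String :=
  if code = "" then "pass"
  else
    let lines := (PySem.Str.split? (PySem.Str.strip code) "\n").getD []
    let cleaned := lines.foldl (fun acc line =>
      let cl := PySem.Str.rstrip line
      if cl ≠ "" ∨ acc = [] ∨ acc.getLast? ≠ some "" then acc ++ [cl] else acc) []
    PySem.Str.join "\n" cleaned

-- ===== PORT B =====
-- port of Source B's run-skipping while loop (the inner while is the dropWhile)
def collapseRunsB : List String → List String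
  | [] => []
  | l :: rest =>
    if l = "" then "" :: collapseRunsB (rest.dropWhile (· == ""))
    else l :: collapseRunsB rest
termination_by ls => ls.length
decreasing_by
  · have := List.length_dropWhile_le (fun s => s == "") rest; simp; omega
  · simp

def clean_python_code_py_alt (code : String) : String :=
  if code = "" then "pass"
  else
    let lines := ((PySem.Str.split? (PySem.Str.strip code) "\n").getD []).map PySem.Str.rstrip
    PySem.Str.join "\n" (collapseRunsB lines)

-- ===== PRECONDITION & SPEC =====
def Spec_clean_python_code_py (code : String) (out : String) : Prop := out = clean_python_code_py_alt code
instance (code : String) (out : String) : Decidable (Spec_clean_python_code_py code out) := by unfold Spec_clean_python_code_py; infer_instance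

-- ===== CLAIM (what is proved, stated in full; the proofs are below) =====
def Claim_equal_clean_python_code_py : Prop := ∀ (code : String), Dom_clean_python_code_py code → Spec_clean_python_code_py code (clean_python_code_py code)

-- ===== LEMMAS AND PROOFS =====

def astepA (acc : List String) (line : String) : List String :=
  let cl := PySem.Str.rstrip line
  if cl ≠ "" ∨ acc = [] ∨ acc.getLast? ≠ some "" then acc ++ [cl] else acc

lemma foldA_eq (ls : List String) : ∀ (acc : List String),
    ls.foldl astepA acc
    = acc ++ (if acc.getLast? = some "" then
        collapseRunsB ((ls.map PySem.Str.rstrip).dropWhile (· == ""))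
      else collapseRunsB (ls.map PySem.Str.rstrip)) := by
  induction ls with
  | nil => intro acc; simp [collapseRunsB]
  | cons l rest ih =>
    intro acc
    rw [List.foldl_cons]
    by_cases hcl : PySem.Str.rstrip l = ""
    · by_cases hlast : acc.getLast? = some ""
      · have hacc : acc ≠ [] := by intro h; simp [h] at hlast
        have hstep : astepA acc l = acc := by simp [astepA, hcl, hlast, hacc]
        rw [hstep, ih acc]
        simp [hlast, hcl, List.dropWhile_cons]
      · have hstep : astepA acc l = acc ++ [PySem.Str.rstrip l] := by
          unfold astepA; rw [if_pos (by tauto)]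
        rw [hstep, ih (acc ++ [PySem.Str.rstrip l])]
        simp [List.getLast?_concat, hcl, hlast, collapseRunsB, List.append_assoc]
    · have hstep : astepA acc l = acc ++ [PySem.Str.rstrip l] := by
        unfold astepA; rw [if_pos (by tauto)]
      rw [hstep, ih (acc ++ [PySem.Str.rstrip l])]
      by_cases hlast : acc.getLast? = some "" <;>
        simp [List.getLast?_concat, hcl, hlast, collapseRunsB, List.append_assoc]

-- ===== VERDICT (by name: the statement is the Claim_ definition above) =====
theorem clean_python_code_py_spec : Claim_equal_clean_python_code_py := by
  intro code _
  unfold Spec_clean_python_code_py clean_python_code_py clean_python_code_py_alt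
  by_cases h : code = ""
  · simp [h]
  · simp only [h, if_false]
    rw [show (fun (acc : List String) (line : String) =>
        let cl := PySem.Str.rstrip line
        if cl ≠ "" ∨ acc = [] ∨ acc.getLast? ≠ some "" then acc ++ [cl] else acc) = astepA from rfl]
    rw [foldA_eq]
    simp
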